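-- pv_equiv track=rewrite | github.com/ucll-programming/course-material | exercises/dictionaries/solutions.py | election_winner
-- ===== SOURCE A (Python) =====
-- def election_winner(votes):
--     vote_counts = {}
--     winner = None
--     winner_vote_count = 0
--     for vote in votes:
--         updated_count = vote_counts.get(vote, 0) + 1
--         vote_counts[vote] = updated_count
--         if updated_count > winner_vote_count:
--             winner = vote
--             winner_vote_count = updated_count
--     return winner
-- ===== SOURCE B (Python) =====
-- def election_winner(votes):
--     if not votes:
--         return None
--     counts = {}
--     for v in votes:
--         counts[v] = counts.get(v, 0) + 1
--     m = max(counts.values())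
--     running = {}
--     for v in votes:
--         c = running.get(v, 0) + 1
--         if c == m:
--             return v
--         running[v] = c
-- ===== Notes on version B (the rewrite author's own statement) =====
-- stated objective: alternative
-- what changed: A tracks the running winner inside one counting loop; B decomposes into building the full count table, taking its maximum M, and a second early-return scan for the first vote whose running count reaches M (same tie-break).
import Mathlib
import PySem

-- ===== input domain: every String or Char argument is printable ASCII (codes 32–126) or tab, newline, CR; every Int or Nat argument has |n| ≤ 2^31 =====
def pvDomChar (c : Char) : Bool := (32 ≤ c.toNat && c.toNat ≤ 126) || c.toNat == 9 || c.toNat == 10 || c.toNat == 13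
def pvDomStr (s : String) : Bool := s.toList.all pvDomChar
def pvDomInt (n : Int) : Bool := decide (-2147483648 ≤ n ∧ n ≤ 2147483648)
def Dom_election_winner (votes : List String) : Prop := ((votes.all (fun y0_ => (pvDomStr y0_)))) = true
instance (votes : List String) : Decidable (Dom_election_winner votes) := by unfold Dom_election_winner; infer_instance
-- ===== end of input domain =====

-- B replaces A's single-pass running-winner loop by a two-phase decomposition: build the
-- full count table, take its maximum M, then a second scan returning the first vote whose
-- running count reaches M (same tie-break, objective: alternative decomposition, not faster).

-- ===== PORT A =====
-- one iteration of A's loop body over the state (vote_counts, winner, winner_vote_count)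
def ewStepA (st : PySem.Dict String Int × Option String × Int) (vote : String) :
    PySem.Dict String Int × Option String × Int :=
  let updated := st.1.getD vote 0 + 1
  let vc := st.1.insert vote updated
  if updated > st.2.2 then (vc, some vote, updated) else (vc, st.2.1, st.2.2)

def election_winner (votes : List String) : Option String :=
  (votes.foldl ewStepA (PySem.Dict.empty, none, 0)).2.1

-- ===== PORT B =====
-- B's second loop: first vote whose running count equals m (early return)
def ewScan (m : Int) (running : PySem.Dict String Int) : List String → Option String
  | [] => none
  | v :: rest =>
    let c := running.getD v 0 + 1
    if c == m then some v else ewScan m (running.insert v c) rest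

def election_winner_alt (votes : List String) : Option String :=
  match votes with
  | [] => none
  | _ =>
    let counts := votes.foldl (fun d v => d.insert v (d.getD v 0 + 1)) PySem.Dict.empty
    match PySem.List.max? counts.values (fun y => y) with
    | none => none   -- unreachable: counts nonempty when votes nonempty
    | some m => ewScan m PySem.Dict.empty votes

-- ===== PRECONDITION & SPEC =====
def Spec_election_winner (votes : List String) (out : Option String) : Prop := out = election_winner_alt votes
instance (votes : List String) (out : Option String) : Decidable (Spec_election_winner votes out) := by unfold Spec_election_winner; infer_instance

-- ===== CLAIM (what is proved, stated in full; the proofs are below) =====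
def Claim_equal_election_winner : Prop := ∀ (votes : List String), Dom_election_winner votes → Spec_election_winner votes (election_winner votes)

-- ===== LEMMAS AND PROOFS =====

-- the scan never hits m when every total reachable count stays below m
lemma ewScan_none (l : List String) : ∀ (m : Int) (d : PySem.Dict String Int),
    (∀ x, d.getD x 0 + (l.count x : Int) < m) → ewScan m d l = none := by
  induction l with
  | nil => intro m d _; rfl
  | cons v rest ih =>
    intro m d h
    have hv := h v
    simp [List.count_cons_self] at hv
    have hne : ¬ (d.getD v 0 + 1 == m) = true := by
      simp only [beq_iff_eq]
      have : (0 : Int) ≤ (rest.count v : Int) := by positivity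
      omega
    simp only [ewScan, hne]
    apply ih
    intro x
    by_cases hx : x = v
    · subst hx
      rw [PySem.Dict.getD_insert_self]
      have := h x
      simp [List.count_cons_self] at this
      omega
    · rw [PySem.Dict.getD_insert_of_ne _ _ _ hx]
      have := h x
      rw [List.count_cons_of_ne (by simpa using Ne.symm hx)] at this
      omega

-- the scan does hit m when some candidate starts below m and can reach it
lemma ewScan_isSome (l : List String) : ∀ (m : Int) (d : PySem.Dict String Int),
    (∃ x, d.getD x 0 < m ∧ m ≤ d.getD x 0 + (l.count x : Int)) →
    ∃ y, ewScan m d l = some y := by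
  induction l with
  | nil =>
    intro m d ⟨x, h1, h2⟩
    simp at h2; omega
  | cons v rest ih =>
    intro m d ⟨x, h1, h2⟩
    by_cases hc : (d.getD v 0 + 1 == m) = true
    · exact ⟨v, by simp only [ewScan, hc, if_true]⟩
    · simp only [beq_iff_eq] at hc
      simp only [ewScan, beq_iff_eq, if_neg hc]
      apply ih
      refine ⟨x, ?_, ?_⟩
      · by_cases hx : x = v
        · subst hx; rw [PySem.Dict.getD_insert_self]
          rw [List.count_cons_self] at h2; push_cast at h2
          omega
        · rw [PySem.Dict.getD_insert_of_ne _ _ _ hx]; exact h1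
      · by_cases hx : x = v
        · subst hx; rw [PySem.Dict.getD_insert_self]
          rw [List.count_cons_self] at h2; push_cast at h2; omega
        · rw [PySem.Dict.getD_insert_of_ne _ _ _ hx]
          rw [List.count_cons_of_ne (by simpa using Ne.symm hx)] at h2; exact h2

-- a successful scan is unaffected by extending the list
lemma ewScan_append_of_some (l : List String) : ∀ (m : Int) (d : PySem.Dict String Int)
    (l' : List String) (x : String), ewScan m d l = some x → ewScan m d (l ++ l') = some x := by
  induction l with
  | nil => intro m d l' x h; simp [ewScan] at h
  | cons v rest ih =>
    intro m d l' x h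
    by_cases hc : (d.getD v 0 + 1 == m) = true
    · simp only [List.cons_append, ewScan, hc, if_true] at h ⊢; exact h
    · simp only [List.cons_append, ewScan, hc] at h ⊢
      exact ih _ _ _ _ h

-- a failed scan over l continues over l' with the fully updated dict
lemma ewScan_append_of_none (l : List String) : ∀ (m : Int) (d : PySem.Dict String Int)
    (l' : List String), ewScan m d l = none →
    ewScan m d (l ++ l') =
      ewScan m (l.foldl (fun d v => d.insert v (d.getD v 0 + 1)) d) l' := by
  induction l with
  | nil => intro m d l' _; rfl
  | cons v rest ih =>
    intro m d l' h
    by_cases hc : (d.getD v 0 + 1 == m) = true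
    · simp only [ewScan, hc, if_true] at h; simp at h
    · simp only [List.cons_append, ewScan, hc] at h ⊢
      simp only [List.foldl_cons]
      exact ih _ _ _ h

-- the fold of A's loop over p yields (counter p, first vote to reach c, c) where c is the max count
lemma foldA_inv (p : List String) :
    (p.foldl ewStepA (PySem.Dict.empty, none, 0)).1 = PySem.Dict.counter p ∧
    (∀ x, ((p.count x : Int)) ≤ (p.foldl ewStepA (PySem.Dict.empty, none, 0)).2.2) ∧
    (p = [] → (p.foldl ewStepA (PySem.Dict.empty, none, 0)).2.2 = 0) ∧
    (p ≠ [] →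
      (∃ x, (p.count x : Int) = (p.foldl ewStepA (PySem.Dict.empty, none, 0)).2.2) ∧
      1 ≤ (p.foldl ewStepA (PySem.Dict.empty, none, 0)).2.2 ∧
      (p.foldl ewStepA (PySem.Dict.empty, none, 0)).2.1 =
        ewScan (p.foldl ewStepA (PySem.Dict.empty, none, 0)).2.2 PySem.Dict.empty p) := by
  have hemp : ∀ x : String, (PySem.Dict.empty : PySem.Dict String Int).getD x 0 = 0 :=
    fun x => by exact_mod_cast PySem.Dict.getD_counter ([] : List String) x
  induction p using List.reverseRecOn with
  | nil =>
    refine ⟨rfl, ?_, fun _ => rfl, fun h => absurd rfl h⟩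
    intro x; simp
  | append_singleton p v ih =>
    obtain ⟨hd, hle, hnil, hne⟩ := ih
    rw [List.foldl_append]
    simp only [List.foldl_cons, List.foldl_nil]
    set st := p.foldl ewStepA (PySem.Dict.empty, none, 0) with hst
    have hcnt : st.1.getD v 0 + 1 = ((p ++ [v]).count v : Int) := by
      rw [hd, PySem.Dict.getD_counter]
      simp [List.count_append]
    have hdict : st.1.insert v (st.1.getD v 0 + 1) = PySem.Dict.counter (p ++ [v]) := by
      rw [hd, ← PySem.Dict.foldl_insert_getD_add_one_eq_counter p,
          ← PySem.Dict.foldl_insert_getD_add_one_eq_counter (p ++ [v]), List.foldl_append]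
      rfl
    have hnn : (0:Int) ≤ st.2.2 := le_trans (by positivity) (hle v)
    have hcne : ∀ x, x ≠ v → ((p ++ [v]).count x : Int) = (p.count x : Int) := by
      intro x hx
      rw [List.count_append, show List.count x [v] = 0 from by simp [List.count_cons]; exact fun h => hx h.symm]
      simp
    have hA : ewStepA st v = (st.1.insert v (st.1.getD v 0 + 1),
        if st.1.getD v 0 + 1 > st.2.2 then (some v, st.1.getD v 0 + 1) else (st.2.1, st.2.2)) := by
      unfold ewStepA; by_cases h : st.1.getD v 0 + 1 > st.2.2 <;> simp [h]
    by_cases hgt : st.1.getD v 0 + 1 > st.2.2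
    · rw [hA, if_pos hgt]
      dsimp only
      refine ⟨hdict, ?_, by simp, fun _ => ⟨⟨v, hcnt.symm⟩, by omega, ?_⟩⟩
      · intro x
        by_cases hx : x = v
        · subst hx; omega
        · rw [hcne x hx]; exact le_trans (hle x) (by omega)
      · -- winner becomes v: the scan finds it as the first to reach the new max
        have h0 : ewScan (st.1.getD v 0 + 1) PySem.Dict.empty p = none := by
          apply ewScan_none
          intro x
          rw [hemp x]
          by_cases hx : x = v
          · subst hx; rw [hd, PySem.Dict.getD_counter]; omega
          · have := hle x; omega
        rw [ewScan_append_of_none p _ _ _ h0,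
            PySem.Dict.foldl_insert_getD_add_one_eq_counter]
        have : ((PySem.Dict.counter p).getD v 0 + 1 == st.1.getD v 0 + 1) = true := by
          rw [hd]; exact beq_self_eq_true _
        simp only [ewScan, this, if_true]
    · rw [hA, if_neg hgt]
      dsimp only
      have hpne : p ≠ [] := by
        intro hp
        subst hp
        have := hnil rfl
        have h0 : st.1.getD v 0 = 0 := by rw [hd]; exact_mod_cast PySem.Dict.getD_counter ([] : List String) v
        omega
      obtain ⟨⟨x, hx⟩, h1, hw⟩ := hne hpne
      have hxv : x ≠ v := by
        intro h; subst h
        have : st.1.getD x 0 = (p.count x : Int) := by rw [hd, PySem.Dict.getD_counter]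
        omega
      refine ⟨hdict, ?_, by simp, fun _ => ⟨⟨x, by rw [hcne x hxv]; exact hx⟩, h1, ?_⟩⟩
      · intro y
        by_cases hy : y = v
        · subst hy; omega
        · rw [hcne y hy]; exact hle y
      · -- winner unchanged: the old scan already returned inside p
        obtain ⟨y, hy⟩ := ewScan_isSome p st.2.2 PySem.Dict.empty
          ⟨x, by rw [hemp x]; omega, by rw [hemp x]; omega⟩
        rw [ewScan_append_of_some p _ _ _ _ hy, hw, hy]

-- ===== VERDICT (by name: the statement is the Claim_ definition above) =====
theorem election_winner_spec : Claim_equal_election_winner := by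
  intro votes _
  unfold Spec_election_winner
  match votes with
  | [] => rfl
  | a :: as =>
    set p := a :: as with hp
    obtain ⟨hd, hle, _, hne⟩ := foldA_inv p
    obtain ⟨⟨x, hx⟩, h1, hw⟩ := hne (by simp [hp])
    have hxp : x ∈ p := by
      rw [← List.count_pos_iff]
      omega
    -- B's max over the counter's values is exactly A's final winner_vote_count
    set c := (p.foldl ewStepA (PySem.Dict.empty, none, 0)).2.2 with hc
    have hvals : (PySem.Dict.counter p).values =
        (PySem.Dict.counter p).keys.map (fun k => (PySem.Dict.counter p).getD k 0) :=
      PySem.Dict.values_eq_map_keys _ (PySem.Dict.nodup_keys_counter p) 0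
    have hmax : PySem.List.max? (PySem.Dict.counter p).values (fun y => y) = some c := by
      obtain ⟨m0, hm0⟩ : ∃ m0, PySem.List.max? (PySem.Dict.counter p).values (fun y => y) = some m0 := by
        cases hEq : PySem.List.max? (PySem.Dict.counter p).values (fun y => y) with
        | none =>
          exfalso
          rw [PySem.List.max?_eq_none_iff, hvals, List.map_eq_nil_iff] at hEq
          have : x ∈ (PySem.Dict.counter p).keys := by
            rw [PySem.Dict.keys_counter, PySem.Set.mem_ofList]; exact hxp
          rw [hEq] at this; exact absurd this (List.not_mem_nil)
        | some m0 => exact ⟨m0, rfl⟩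
      have hmem := PySem.List.max?_mem hm0
      rw [hvals, List.mem_map] at hmem
      obtain ⟨k, _, hk⟩ := hmem
      have hk' : m0 = ((p.count k : Nat) : Int) := by
        rw [← hk, PySem.Dict.getD_counter]
      have hub : m0 ≤ c := by rw [hk']; exact hle k
      have hlb : c ≤ m0 := by
        have hxmem : ((p.count x : Nat) : Int) ∈ (PySem.Dict.counter p).values := by
          rw [hvals, List.mem_map]
          exact ⟨x, by rw [PySem.Dict.keys_counter, PySem.Set.mem_ofList]; exact hxp,
            PySem.Dict.getD_counter p x⟩
        have := PySem.List.max?_isMax hm0 _ hxmem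
        simpa [hx] using this
      rw [hm0]; congr 1; omega
    show (p.foldl ewStepA (PySem.Dict.empty, none, 0)).2.1 = _
    rw [hw]
    simp only [election_winner_alt, PySem.Dict.foldl_insert_getD_add_one_eq_counter]
    rw [hmax]
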